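-- pv_equiv track=rewrite | github.com/zealchou/MUSEON | src/museon/nightly/skill_install_worker.py | _find_table_last_row_index
-- ===== SOURCE A (Python) =====
-- from typing import Any, Dict, List, Optional
--
-- def _find_table_last_row_index(lines: List[str]) -> int:
--     """找到 Markdown 表格最後一個資料行的索引（排除分隔行 |---|）.
--
--     Returns:
--         最後一個資料行的索引，找不到時返回 -1。
--     """
--     last_idx = -1
--     for i, line in enumerate(lines):
--         stripped = line.strip()
--         if stripped.startswith("|") and stripped.endswith("|"):
--             # 排除純分隔行（只有 | - |）
--             inner = stripped[1:-1]
--             if all(c in "-: |" for c in inner):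
--                 continue
--             last_idx = i
--     return last_idx
-- ===== SOURCE B (Python) =====
-- def _find_table_last_row_index(lines):
--     """Scan from the end and return the first data row found (same predicate as A)."""
--     for i, line in reversed(list(enumerate(lines))):
--         stripped = line.strip()
--         if (stripped.startswith("|") and stripped.endswith("|")
--                 and not all(c in "-: |" for c in stripped[1:-1])):
--             return i
--     return -1
-- ===== Notes on version B (the rewrite author's own statement) =====
-- stated objective: alternative
-- what changed: B scans the lines from the end and returns the index of the first data row it meets (early exit), instead of A's forward pass that keeps overwriting a last-seen accumulator.
import Mathlib
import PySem

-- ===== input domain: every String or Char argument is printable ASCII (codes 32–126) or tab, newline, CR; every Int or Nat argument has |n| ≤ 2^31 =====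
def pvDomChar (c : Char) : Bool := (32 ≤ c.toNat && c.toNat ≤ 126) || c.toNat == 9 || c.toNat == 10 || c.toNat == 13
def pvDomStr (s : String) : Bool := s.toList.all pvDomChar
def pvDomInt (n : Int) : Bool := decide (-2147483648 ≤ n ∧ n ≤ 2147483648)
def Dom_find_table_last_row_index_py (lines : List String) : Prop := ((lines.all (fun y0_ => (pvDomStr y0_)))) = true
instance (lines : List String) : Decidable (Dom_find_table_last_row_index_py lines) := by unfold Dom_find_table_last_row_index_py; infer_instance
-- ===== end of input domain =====

-- B scans from the end and returns at the first data row (early exit) instead of A's forward last-seen accumulator; return values proved equal.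


-- ===== PORT A =====
-- forward pass over enumerate(lines), keeping the last index of a data row
def find_table_last_row_index_py (lines : List String) : Int :=
  (PySem.List.enumerate lines 0).foldl
    (fun last_idx p =>
      let stripped := PySem.Str.strip p.2
      if PySem.Str.startswith stripped "|" && PySem.Str.endswith stripped "|" then
        -- inner = stripped[1:-1]; c in "-: |" for a single char = substring test
        let inner := PySem.Str.slice stripped (some 1) (some (-1))
        if inner.toList.all (fun c => PySem.Str.isIn (String.ofList [c]) "-: |") then
          last_idx
        else p.1
      else last_idx)
    (-1)

-- ===== PORT B =====
-- the data-row predicate of Source B's single `if`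
def pvIsDataRow (line : String) : Bool :=
  let stripped := PySem.Str.strip line
  PySem.Str.startswith stripped "|" && PySem.Str.endswith stripped "|" &&
    !((PySem.Str.slice stripped (some 1) (some (-1))).toList.all
        (fun c => PySem.Str.isIn (String.ofList [c]) "-: |"))

-- Source B's loop over reversed(list(enumerate(lines))) with early return
def pvAltGo : List (Int × String) → Int
  | [] => -1
  | (i, line) :: rest => if pvIsDataRow line then i else pvAltGo rest

def find_table_last_row_index_py_alt (lines : List String) : Int :=
  pvAltGo (PySem.List.enumerate lines 0).reverse

-- ===== PRECONDITION & SPEC =====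
def Spec_find_table_last_row_index_py (lines : List String) (out : Int) : Prop := out = find_table_last_row_index_py_alt lines
instance (lines : List String) (out : Int) : Decidable (Spec_find_table_last_row_index_py lines out) := by unfold Spec_find_table_last_row_index_py; infer_instance

-- ===== CLAIM (what is proved, stated in full; the proofs are below) =====
def Claim_equal_find_table_last_row_index_py : Prop := ∀ (lines : List String), Dom_find_table_last_row_index_py lines → Spec_find_table_last_row_index_py lines (find_table_last_row_index_py lines)

-- ===== LEMMAS AND PROOFS =====

-- A's fold step is "if data row then new index else keep accumulator"
theorem pvStepEq (last_idx : Int) (p : Int × String) :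
    (let stripped := PySem.Str.strip p.2
     if PySem.Str.startswith stripped "|" && PySem.Str.endswith stripped "|" then
       let inner := PySem.Str.slice stripped (some 1) (some (-1))
       if inner.toList.all (fun c => PySem.Str.isIn (String.ofList [c]) "-: |") then
         last_idx
       else p.1
     else last_idx)
    = if pvIsDataRow p.2 then p.1 else last_idx := by
  by_cases h1 : (PySem.Str.startswith (PySem.Str.strip p.2) "|" &&
      PySem.Str.endswith (PySem.Str.strip p.2) "|") = true <;>
  by_cases h2 : ((PySem.Str.slice (PySem.Str.strip p.2) (some 1) (some (-1))).toList.all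
      (fun c => PySem.Str.isIn (String.ofList [c]) "-: |")) = true <;>
  simp only [pvIsDataRow] <;> simp_all <;> split_ifs <;> simp_all

-- generalized reverse-scan: scanning the reverse with early exit equals folding forward
def pvGo : List (Int × String) → Int → Int
  | [], a => a
  | (i, line) :: rest, a => if pvIsDataRow line then i else pvGo rest a

theorem pvAltGo_eq_pvGo (L : List (Int × String)) : pvAltGo L = pvGo L (-1) := by
  induction L with
  | nil => rfl
  | cons p rest ih => cases p; simp [pvAltGo, pvGo, ih]

theorem pvFoldl_eq_pvGo_reverse (L : List (Int × String)) (a : Int) :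
    L.foldl (fun last_idx p => if pvIsDataRow p.2 then p.1 else last_idx) a
      = pvGo L.reverse a := by
  induction L using List.reverseRecOn generalizing a with
  | nil => rfl
  | append_singleton L x ih =>
      cases x with
      | mk i line =>
        simp only [List.foldl_append, List.foldl_cons, List.foldl_nil,
          List.reverse_append, List.reverse_cons, List.reverse_nil, List.nil_append,
          List.cons_append, pvGo]
        cases h : pvIsDataRow line <;> simp [ih]

-- ===== VERDICT (by name: the statement is the Claim_ definition above) =====
theorem find_table_last_row_index_py_spec : Claim_equal_find_table_last_row_index_py := by
  intro lines _
  unfold Spec_find_table_last_row_index_py find_table_last_row_index_py find_table_last_row_index_py_alt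
  have hfun : (fun (last_idx : Int) (p : Int × String) =>
      let stripped := PySem.Str.strip p.2
      if PySem.Str.startswith stripped "|" && PySem.Str.endswith stripped "|" then
        let inner := PySem.Str.slice stripped (some 1) (some (-1))
        if inner.toList.all (fun c => PySem.Str.isIn (String.ofList [c]) "-: |") then
          last_idx
        else p.1
      else last_idx)
      = (fun (last_idx : Int) (p : Int × String) => if pvIsDataRow p.2 then p.1 else last_idx) :=
    funext fun a => funext fun p => pvStepEq a p
  rw [hfun, pvFoldl_eq_pvGo_reverse, ← pvAltGo_eq_pvGo]
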